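-- pv_equiv track=rewrite | github.com/tarnowsky/Matura-projects | 2021/zadanie 4.py | konstruuj_napis
-- ===== SOURCE A (Python) =====
-- def zamiana_litery(a:str, b):
--     ile = int(b)
--     nowa_litera = ord(a) + ile
--     if nowa_litera > 90:
--         nowa_litera -= 26
--     return chr(nowa_litera)
--
-- def konstruuj_napis(tab:list):
--     napis = []
--     for insturkcja_lit in tab:
--         polecenie = insturkcja_lit[0]
--         litera = insturkcja_lit[1]
--         if polecenie == 'DOPISZ':
--             napis += [litera]
--         if polecenie == 'ZMIEN':
--             napis[-1] = litera
--         if polecenie == 'USUN':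
--             napis.pop()
--         if polecenie == 'PRZESUN':
--             napis[napis.index(litera)] = zamiana_litery(litera, 1)
--     napis = ''.join(napis)
--     return napis
-- ===== SOURCE B (Python) =====
-- def _make(sz):
--     if sz == 1:
--         return [None]
--     half = sz // 2
--     return [{}, _make(half), _make(half)]
--
-- def _set(t, sz, p, v):
--     if sz == 1:
--         old = t[0]
--         t[0] = v
--         return old
--     half = sz // 2
--     if p < half:
--         old = _set(t[1], half, p, v)
--     else:
--         old = _set(t[2], half, p - half, v)
--     c = t[0]
--     if old is not None:
--         c[old] = c.get(old, 0) - 1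
--     if v is not None:
--         c[v] = c.get(v, 0) + 1
--     return old
--
-- def _count(t, v):
--     if len(t) == 1:
--         return 1 if t[0] == v else 0
--     return t[0].get(v, 0)
--
-- def _leftmost(t, sz, v):
--     if _count(t, v) <= 0:
--         raise ValueError('not in string')
--     p = 0
--     while sz > 1:
--         sz //= 2
--         if _count(t[1], v) > 0:
--             t = t[1]
--         else:
--             p += sz
--             t = t[2]
--     return p
--
-- def _collect(t, sz, ln):
--     if ln <= 0:
--         return []
--     if sz == 1:
--         return [t[0]]
--     half = sz // 2
--     if ln <= half:
--         return _collect(t[1], half, ln)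
--     return _collect(t[1], half, half) + _collect(t[2], half, ln - half)
--
-- def konstruuj_napis(tab):
--     sz = 1
--     while sz < len(tab):
--         sz *= 2
--     tree = _make(sz)
--     ln = 0
--     for ins in tab:
--         cmd = ins[0]
--         lit = ins[1]
--         if cmd == 'DOPISZ':
--             _set(tree, sz, ln, lit)
--             ln += 1
--         elif cmd == 'ZMIEN':
--             _set(tree, sz, ln - 1, lit)
--         elif cmd == 'USUN':
--             ln -= 1
--             _set(tree, sz, ln, None)
--         elif cmd == 'PRZESUN':
--             o = ord(lit) + 1
--             _set(tree, sz, _leftmost(tree, sz, lit), chr(o - 26 if o > 90 else o))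
--     return ''.join(_collect(tree, sz, ln))
-- ===== Notes on version B (the rewrite author's own statement) =====
-- stated objective: alternative
-- what changed: B replaces A's list-of-chunks simulation (whole-string list.index scan per PRZESUN) by a counting segment tree over positions: leaves hold the current chunks, each node counts chunk multiplicities below it, the first occurrence is found by a logarithmic tree descent, and the final string is read off the leaves in one traversal; per-shift work drops from O(n) to O(log n), though CPython's C-level list.index keeps wall-clock times comparable, so no speed is claimed.
import Mathlib
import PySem

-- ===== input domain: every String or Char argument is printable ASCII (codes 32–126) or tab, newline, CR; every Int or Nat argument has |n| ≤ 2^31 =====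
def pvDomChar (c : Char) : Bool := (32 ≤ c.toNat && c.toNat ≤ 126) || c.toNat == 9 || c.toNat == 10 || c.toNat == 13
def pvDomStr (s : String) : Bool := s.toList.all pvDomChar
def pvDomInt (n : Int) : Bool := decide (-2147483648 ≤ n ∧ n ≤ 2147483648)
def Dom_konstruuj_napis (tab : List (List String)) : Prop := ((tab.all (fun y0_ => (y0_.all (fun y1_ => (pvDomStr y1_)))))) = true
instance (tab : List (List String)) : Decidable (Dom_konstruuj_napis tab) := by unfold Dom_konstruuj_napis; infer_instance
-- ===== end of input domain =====

-- B replaces A's list-of-chunks simulation (with a whole-string .index scan on PRZESUN) by a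
-- counting segment tree over positions: leaves hold chunks, nodes count chunk multiplicities,
-- and the first occurrence is found by descending the tree; the string is read off the leaves at the end.

-- ===== PORT A =====
-- ord(a): no PySem primitive; ported by hand — exact for single-character strings (ord raises on others: outside Pre_)
def pyOrd (a : String) : Nat :=
  match a.toList with
  | [c] => c.toNat
  | _ => 0

def zamiana_litery (a : String) (b : Int) : String :=
  let ile : Int := b                         -- int(b) on an int is the identity
  let nowa_litera : Int := (pyOrd a : Int) + ile
  let nowa_litera : Int := if nowa_litera > 90 then nowa_litera - 26 else nowa_litera
  -- chr(n): ported by hand, exact for 0 ≤ n < 0x110000 (always the case under Pre_)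
  String.mk [Char.ofNat nowa_litera.toNat]

def konstruujA : List (List String) → List String → List String
  | [], napis => napis
  | ins :: rest, napis =>
    let polecenie := (PySem.List.pyGet? ins 0).getD ""
    let litera := (PySem.List.pyGet? ins 1).getD ""
    let napis := if polecenie == "DOPISZ" then napis ++ [litera] else napis
    let napis := if polecenie == "ZMIEN" then PySem.List.pySetD napis (-1) litera else napis
    let napis := if polecenie == "USUN" then
        match PySem.List.pop? napis (-1) with
        | some r => r.2
        | none => napis
      else napis
    let napis := if polecenie == "PRZESUN" then
        match PySem.List.index? napis litera with
        | some i => napis.set i (zamiana_litery litera 1)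
        | none => napis
      else napis
    konstruujA rest napis

def konstruuj_napis (tab : List (List String)) : String :=
  PySem.Str.join "" (konstruujA tab [])

-- ===== PORT B =====
-- the segment tree: a leaf per position (its current chunk, none = empty slot),
-- an internal node counts, per chunk value, the occupied slots below it
inductive PvTree
  | leaf : Option String → PvTree
  | node : PySem.Dict String Int → PvTree → PvTree → PvTree
deriving DecidableEq, Repr

-- python: sz = 1; while sz < len(tab): sz *= 2   (fuel only makes the loop total; len(tab) iterations always suffice)
def pvSzLoop : Nat → Int → Int → Int
  | 0, sz, _ => sz
  | f + 1, sz, n => if sz < n then pvSzLoop f (2 * sz) n else sz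

-- python _make; sz here is a positive power of two, where Lean's Int '/' agrees with Python's '//'
def pvMake (sz : Int) : PvTree :=
  if h : sz ≤ 1 then .leaf none
  else .node PySem.Dict.empty (pvMake (sz / 2)) (pvMake (sz / 2))
termination_by sz.toNat
decreasing_by all_goals · simp only [not_le] at h; omega

-- python: if old is not None: c[old] = c.get(old,0)-1 ; if v is not None: c[v] = c.get(v,0)+1
def pvAdjust (c : PySem.Dict String Int) (old v : Option String) : PySem.Dict String Int :=
  let c1 := match old with
    | some s => c.insert s (c.getD s 0 - 1)
    | none => c
  match v with
  | some s => c1.insert s (c1.getD s 0 + 1)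
  | none => c1

-- python _set (tree mutation ported as state passing; returns (new tree, old leaf value))
def pvSet : PvTree → Int → Int → Option String → PvTree × Option String
  | .leaf old, _, _, v => (.leaf v, old)
  | .node c l r, sz, p, v =>
    let half := sz / 2
    if p < half then
      let res := pvSet l half p v
      (.node (pvAdjust c res.2 v) res.1 r, res.2)
    else
      let res := pvSet r half (p - half) v
      (.node (pvAdjust c res.2 v) l res.1, res.2)

def pvCount : PvTree → String → Int
  | .leaf o, v => if o = some v then 1 else 0
  | .node c _ _, v => c.getD v 0

-- python _leftmost's descent loop (p accumulates the offset)
def pvDesc (v : String) : PvTree → Int → Int → Int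
  | .leaf _, _, p => p
  | .node _ l r, sz, p =>
    let half := sz / 2
    if pvCount l v > 0 then pvDesc v l half p else pvDesc v r half (p + half)

-- python _leftmost; none = the ValueError branch (outside Pre_)
def pvLeftmost (t : PvTree) (sz : Int) (v : String) : Option Int :=
  if pvCount t v ≤ 0 then none else some (pvDesc v t sz 0)

-- python _collect; a None leaf below ln makes ''.join raise in Python (outside Pre_), ported as ""
def pvCollect : PvTree → Int → Int → List String
  | .leaf o, _, ln => if ln ≤ 0 then [] else [o.getD ""]
  | .node _ l r, sz, ln =>
    if ln ≤ 0 then []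
    else
      let half := sz / 2
      if ln ≤ half then pvCollect l half ln
      else pvCollect l half half ++ pvCollect r half (ln - half)

def konstruujB : List (List String) → PvTree → Int → Int → PvTree × Int
  | [], t, ln, _ => (t, ln)
  | ins :: rest, t, ln, sz =>
    let cmd := (PySem.List.pyGet? ins 0).getD ""
    let lit := (PySem.List.pyGet? ins 1).getD ""
    if cmd == "DOPISZ" then
      konstruujB rest (pvSet t sz ln (some lit)).1 (ln + 1) sz
    else if cmd == "ZMIEN" then
      konstruujB rest (pvSet t sz (ln - 1) (some lit)).1 ln sz
    else if cmd == "USUN" then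
      konstruujB rest (pvSet t sz (ln - 1) none).1 (ln - 1) sz
    else if cmd == "PRZESUN" then
      match pvLeftmost t sz lit with
      | none => konstruujB rest t ln sz        -- python raises ValueError here: outside Pre_
      | some p =>
        let o : Int := (pyOrd lit : Int) + 1
        let nowa := String.mk [Char.ofNat (if o > 90 then o - 26 else o).toNat]
        konstruujB rest (pvSet t sz p (some nowa)).1 ln sz
    else konstruujB rest t ln sz

def konstruuj_napis_alt (tab : List (List String)) : String :=
  let sz := pvSzLoop tab.length 1 (tab.length : Int)
  let res := konstruujB tab (pvMake sz) 0 sz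
  PySem.Str.join "" (pvCollect res.1 sz res.2)

-- ===== PRECONDITION & SPEC =====
def pvNast (a : String) : String :=
  let o : Int := (pyOrd a : Int) + 1
  String.mk [Char.ofNat (if o > 90 then o - 26 else o).toNat]

-- One step of the instruction semantics; none exactly where A raises
-- (instruction shorter than 2, ZMIEN/USUN on the empty string, PRZESUN whose letter
-- is absent or not a single character).
def pvKrok (napis : List String) (ins : List String) : Option (List String) :=
  if ins.length < 2 then none
  else
    let c := ins.getD 0 ""
    let l := ins.getD 1 ""
    if c = "DOPISZ" then some (napis ++ [l])
    else if c = "ZMIEN" then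
      if napis.isEmpty then none else some (napis.set (napis.length - 1) l)
    else if c = "USUN" then
      if napis.isEmpty then none else some napis.dropLast
    else if c = "PRZESUN" then
      if l.toList.length = 1 then
        match PySem.List.index? napis l with
        | some i => some (napis.set i (pvNast l))
        | none => none
      else none
    else some napis

def pvBezpieczny : List (List String) → List String → Bool
  | [], _ => true
  | ins :: rest, napis =>
    match pvKrok napis ins with
    | some napis' => pvBezpieczny rest napis'
    | none => false

-- Pre_ excludes exactly the inputs on which the Python A raises (IndexError/ValueError/TypeError).
def Pre_konstruuj_napis (tab : List (List String)) : Prop := pvBezpieczny tab [] = true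
instance (tab : List (List String)) : Decidable (Pre_konstruuj_napis tab) := by
  unfold Pre_konstruuj_napis; infer_instance

def pvWitness_konstruuj_napis : List (List String) :=
  [["DOPISZ", "A"], ["DOPISZ", "Z"], ["PRZESUN", "Z"], ["ZMIEN", "x"], ["USUN", "q"], ["FOO", "?"]]

def Spec_konstruuj_napis (tab : List (List String)) (out : String) : Prop := out = konstruuj_napis_alt tab
instance (tab : List (List String)) (out : String) : Decidable (Spec_konstruuj_napis tab out) := by
  unfold Spec_konstruuj_napis; infer_instance

-- ===== CLAIM (what is proved, stated in full; the proofs are below) =====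
def Claim_equal_konstruuj_napis : Prop := ∀ (tab : List (List String)), Dom_konstruuj_napis tab → Pre_konstruuj_napis tab → Spec_konstruuj_napis tab (konstruuj_napis tab)

-- ===== LEMMAS AND PROOFS =====

-- the in-order leaf contents of a tree
def pvLeaves : PvTree → List (Option String)
  | .leaf o => [o]
  | .node _ l r => pvLeaves l ++ pvLeaves r

-- a perfect tree of height k
def pvShape : PvTree → Nat → Prop
  | .leaf _, 0 => True
  | .node _ l r, k + 1 => pvShape l k ∧ pvShape r k
  | _, _ => False

def pvCnt (t : PvTree) (v : String) : Int := ((pvLeaves t).count (some v) : Int)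

-- every node's dict counts the occupied leaves below it
def pvWF : PvTree → Prop
  | .leaf _ => True
  | .node c l r => (∀ v, c.getD v 0 = pvCnt l v + pvCnt r v) ∧ pvWF l ∧ pvWF r

lemma pvLeaves_length : ∀ (k : Nat) (t : PvTree), pvShape t k → (pvLeaves t).length = 2 ^ k := by
  intro k
  induction k with
  | zero => intro t h; cases t with
    | leaf o => simp [pvLeaves]
    | node c l r => exact absurd h (by simp [pvShape])
  | succ k ih => intro t h; cases t with
    | leaf o => exact absurd h (by simp [pvShape])
    | node c l r =>
      obtain ⟨hl, hr⟩ := h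
      simp [pvLeaves, ih l hl, ih r hr, pow_succ]; ring

lemma pvHalf (k : Nat) : ((2 : Int) ^ (k + 1)) / 2 = 2 ^ k := by
  rw [pow_succ]; exact Int.mul_ediv_cancel _ (by norm_num)

lemma pvMake_spec : ∀ (k : Nat),
    pvShape (pvMake ((2 : Int) ^ k)) k ∧
    pvLeaves (pvMake ((2 : Int) ^ k)) = List.replicate (2 ^ k) none ∧
    pvWF (pvMake ((2 : Int) ^ k)) := by
  intro k
  induction k with
  | zero =>
    rw [pvMake]
    simp [pvShape, pvLeaves, pvWF]
  | succ k ih =>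
    have h2 : ¬ ((2 : Int) ^ (k + 1) ≤ 1) := by
      have : (2 : Int) ^ (k + 1) ≥ 2 := by
        calc (2:Int) ^ (k+1) ≥ 2^1 := by
              apply pow_le_pow_right₀ <;> omega
          _ = 2 := by norm_num
      omega
    rw [pvMake, dif_neg h2, pvHalf]
    obtain ⟨hs, hl, hw⟩ := ih
    refine ⟨⟨hs, hs⟩, ?_, ?_, hw, hw⟩
    · simp only [pvLeaves, hl]
      rw [← List.replicate_add]
      congr 1
      rw [pow_succ, Nat.mul_two]
    · intro v
      simp [PySem.Dict.getD, PySem.Dict.get?, PySem.Dict.empty, pvCnt, hl]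
      simp [List.count_replicate]

lemma pvSzLoop_pow : ∀ (f : Nat) (j : Nat) (n : Int), ∃ k, pvSzLoop f ((2:Int)^j) n = (2:Int) ^ k := by
  intro f
  induction f with
  | zero => intro j n; exact ⟨j, rfl⟩
  | succ f ih =>
    intro j n
    rw [pvSzLoop]
    by_cases h : (2:Int)^j < n
    · rw [if_pos h]
      have : 2 * (2:Int)^j = 2^(j+1) := by rw [pow_succ]; ring
      rw [this]; exact ih (j+1) n
    · rw [if_neg h]; exact ⟨j, rfl⟩

lemma pvSzLoop_ge : ∀ (f : Nat) (sz n : Int), 1 ≤ sz → n ≤ sz + f → n ≤ pvSzLoop f sz n := by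
  intro f
  induction f with
  | zero => intro sz n h1 h2; simpa [pvSzLoop] using h2
  | succ f ih =>
    intro sz n h1 h2
    rw [pvSzLoop]
    by_cases h : sz < n
    · rw [if_pos h]
      exact ih (2 * sz) n (by omega) (by push_cast at h2 ⊢; omega)
    · rw [if_neg h]; omega

lemma pvCount_eq : ∀ (k : Nat) (t : PvTree) (v : String), pvShape t k → pvWF t →
    pvCount t v = pvCnt t v := by
  intro k t v hs hw
  cases t with
  | leaf o =>
    simp only [pvCount, pvCnt, pvLeaves, List.count_cons, List.count_nil, beq_iff_eq]
    split_ifs with h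
    · subst h; simp
    · simp
  | node c l r =>
    cases k with
    | zero => exact absurd hs (by simp [pvShape])
    | succ k =>
      obtain ⟨hc, _, _⟩ := hw
      simp only [pvCount, pvCnt, pvLeaves, List.count_append]
      rw [hc v]; simp [pvCnt]

lemma count_set {α : Type} [BEq α] [LawfulBEq α] [DecidableEq α] :
    ∀ (l : List α) (i : Nat) (x a : α), i < l.length →
    (((l.set i x).count a : Int)) = (l.count a : Int) + (if x = a then 1 else 0) - (if l.getD i x = a then 1 else 0) := by
  intro l
  induction l with
  | nil => intro i x a h; simp at h
  | cons b t ih =>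
    intro i x a h
    cases i with
    | zero =>
      simp only [List.set_cons_zero, List.getD_cons_zero, List.count_cons, beq_iff_eq]
      split_ifs <;> push_cast <;> omega
    | succ i =>
      simp only [List.set_cons_succ, List.getD_cons_succ, List.count_cons, beq_iff_eq]
      have := ih i x a (by simpa using h)
      split_ifs at this ⊢ <;> push_cast at this ⊢ <;> omega

lemma pvAdjust_getD (c : PySem.Dict String Int) (old v : Option String) (w : String) :
    (pvAdjust c old v).getD w 0 =
      c.getD w 0 - (if old = some w then 1 else 0) + (if v = some w then 1 else 0) := by
  have key : ∀ (d : PySem.Dict String Int) (s : String) (x : Int),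
      (d.insert s (d.getD s 0 + x)).getD w 0 = d.getD w 0 + (if s = w then x else 0) := by
    intro d s x
    rw [PySem.Dict.getD_insert]
    by_cases h : s = w
    · subst h; simp
    · rw [if_neg (fun hh => h hh.symm), if_neg h, add_zero]
  cases old with
  | none =>
    cases v with
    | none => simp [pvAdjust]
    | some s =>
      show (c.insert s (c.getD s 0 + 1)).getD w 0 = _
      rw [key]
      simp only [Option.some.injEq, reduceCtorEq, if_false, sub_zero]
      all_goals (split_ifs <;> omega)
  | some s =>
    cases v with
    | none =>
      show (c.insert s (c.getD s 0 - 1)).getD w 0 = _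
      rw [sub_eq_add_neg, key]
      simp only [Option.some.injEq, reduceCtorEq, if_false, add_zero]
      all_goals (split_ifs <;> omega)
    | some s' =>
      show ((c.insert s (c.getD s 0 - 1)).insert s'
          ((c.insert s (c.getD s 0 - 1)).getD s' 0 + 1)).getD w 0 = _
      rw [key, sub_eq_add_neg, key]
      simp only [Option.some.injEq]
      by_cases h1 : s = w <;> by_cases h2 : s' = w <;> simp [h1, h2] <;> omega

lemma pvSet_spec : ∀ (k : Nat) (t : PvTree) (i : Nat) (v : Option String),
    pvShape t k → i < 2 ^ k →
    pvShape (pvSet t ((2:Int) ^ k) (i : Int) v).1 k ∧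
    pvLeaves (pvSet t ((2:Int) ^ k) (i : Int) v).1 = (pvLeaves t).set i v ∧
    (pvSet t ((2:Int) ^ k) (i : Int) v).2 = (pvLeaves t).getD i none ∧
    (pvWF t → pvWF (pvSet t ((2:Int) ^ k) (i : Int) v).1) := by
  intro k
  induction k with
  | zero =>
    intro t i v hs hi
    cases t with
    | node c l r => exact absurd hs (by simp [pvShape])
    | leaf o =>
      interval_cases i
      simp [pvSet, pvShape, pvLeaves, pvWF]
  | succ k ih =>
    intro t i v hs hi
    cases t with
    | leaf o => exact absurd hs (by simp [pvShape])
    | node c l r =>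
      obtain ⟨hsl, hsr⟩ := hs
      have hLl := pvLeaves_length k l hsl
      have hLr := pvLeaves_length k r hsr
      simp only [pvSet, pvHalf]
      by_cases hlt : i < 2 ^ k
      · have hcast : ((i : Int) < 2 ^ k) := by exact_mod_cast hlt
        rw [if_pos hcast]
        obtain ⟨s1, s2, s3, s4⟩ := ih l i v hsl hlt
        refine ⟨⟨s1, hsr⟩, ?_, ?_, ?_⟩
        · simp only [pvLeaves, s2]
          rw [List.set_append_left _ _ (by rw [hLl]; exact hlt)]
        · simp only [pvLeaves, s3]
          rw [List.getD_append _ _ _ _ (by rw [hLl]; exact hlt)]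
        · rintro ⟨hc, hwl, hwr⟩
          refine ⟨?_, s4 hwl, hwr⟩
          intro w
          rw [pvAdjust_getD, hc w, s3]
          have hgs : (pvLeaves l).getD i none = (pvLeaves l).getD i v := by
            rw [List.getD_eq_getElem _ _ (by omega), List.getD_eq_getElem _ _ (by omega)]
          unfold pvCnt
          rw [s2, count_set (pvLeaves l) i v (some w) (by omega), hgs]
          ring
      · have hcast : ¬ ((i : Int) < 2 ^ k) := by
          push_neg; exact_mod_cast Nat.le_of_not_lt hlt
        rw [if_neg hcast]
        have hi' : i - 2 ^ k < 2 ^ k := by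
          have : 2 ^ (k+1) = 2 ^ k + 2 ^ k := by rw [pow_succ]; omega
          omega
        have hsub : (i : Int) - 2 ^ k = ((i - 2 ^ k : Nat) : Int) := by
          push_cast [Nat.le_of_not_lt hlt]; ring
        rw [hsub]
        obtain ⟨s1, s2, s3, s4⟩ := ih r (i - 2 ^ k) v hsr hi'
        refine ⟨⟨hsl, s1⟩, ?_, ?_, ?_⟩
        · simp only [pvLeaves, s2]
          rw [List.set_append_right _ _ (by omega), hLl]
        · simp only [pvLeaves, s3]
          rw [List.getD_append_right _ _ _ _ (by omega), hLl]
        · rintro ⟨hc, hwl, hwr⟩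
          refine ⟨?_, hwl, s4 hwr⟩
          intro w
          rw [pvAdjust_getD, hc w, s3]
          have hgs : (pvLeaves r).getD (i - 2^k) none = (pvLeaves r).getD (i - 2^k) v := by
            rw [List.getD_eq_getElem _ _ (by omega), List.getD_eq_getElem _ _ (by omega)]
          unfold pvCnt
          rw [s2, count_set (pvLeaves r) (i - 2^k) v (some w) (by omega), hgs]
          ring

lemma pvDesc_spec : ∀ (k : Nat) (t : PvTree) (v : String) (p0 : Int) (i : Nat),
    pvShape t k → pvWF t → (h : i < (pvLeaves t).length) → (pvLeaves t)[i] = some v →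
    (∀ j (hj : j < i), (pvLeaves t)[j]'(by omega) ≠ some v) →
    pvDesc v t ((2:Int) ^ k) p0 = p0 + i := by
  intro k
  induction k with
  | zero =>
    intro t v p0 i hs hw h hv hmin
    cases t with
    | node c l r => exact absurd hs (by simp [pvShape])
    | leaf o =>
      simp only [pvLeaves, List.length_singleton] at h
      interval_cases i
      simp [pvDesc]
  | succ k ih =>
    intro t v p0 i hs hw h hv hmin
    cases t with
    | leaf o => exact absurd hs (by simp [pvShape])
    | node c l r =>
      obtain ⟨hsl, hsr⟩ := hs
      obtain ⟨hc, hwl, hwr⟩ := hw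
      have hLl := pvLeaves_length k l hsl
      have hLr := pvLeaves_length k r hsr
      simp only [pvLeaves] at h hv hmin
      simp only [pvDesc, pvHalf]
      have hcnt : pvCount l v = ((pvLeaves l).count (some v) : Int) := pvCount_eq k l v hsl hwl
      by_cases hmem : (some v) ∈ pvLeaves l
      · have hpos : pvCount l v > 0 := by
          rw [hcnt]; exact_mod_cast List.count_pos_iff.mpr hmem
        rw [if_pos hpos]
        -- the first occurrence is inside the left subtree
        have hiL : i < (pvLeaves l).length := by
          by_contra hge
          push_neg at hge
          obtain ⟨j, hj, hjv⟩ := List.getElem_of_mem hmem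
          refine hmin j (by omega) ?_
          rw [List.getElem_append_left hj]
          exact hjv
        apply ih l v p0 i hsl hwl hiL
        · rw [← List.getElem_append_left (bs := pvLeaves r) hiL]
          exact hv
        · intro j hj
          have := hmin j (by omega)
          rw [List.getElem_append_left (by omega)] at this
          exact this
      · have hpos : ¬ (pvCount l v > 0) := by
          rw [hcnt, List.count_eq_zero.mpr hmem]
          simp
        rw [if_neg hpos]
        have hiR : ¬ (i < (pvLeaves l).length) := by
          intro hiL
          apply hmem
          rw [← hv, List.getElem_append_left hiL]
          exact List.getElem_mem _
        push_neg at hiR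
        have hlen : i - (pvLeaves l).length < (pvLeaves r).length := by
          simp only [List.length_append] at h; omega
        have hstep := ih r v (p0 + 2 ^ k) (i - (pvLeaves l).length) hsr hwr hlen
          (by rw [← hv, List.getElem_append_right hiR])
          (by
            intro j hj
            have h2 := hmin ((pvLeaves l).length + j) (by omega)
            rw [List.getElem_append_right (by omega)] at h2
            simpa using h2)
        rw [hstep]
        have hcast : ((i - (pvLeaves l).length : Nat) : Int) = (i : Int) - ((pvLeaves l).length : Int) := by
          omega
        rw [hcast, hLl]
        push_cast
        ring

lemma collect_spec : ∀ (k : Nat) (t : PvTree) (napis : List String),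
    pvShape t k →
    pvLeaves t = napis.map some ++ List.replicate (2 ^ k - napis.length) none →
    napis.length ≤ 2 ^ k →
    pvCollect t ((2:Int) ^ k) ((napis.length : Int)) = napis := by
  intro k
  induction k with
  | zero =>
    intro t napis hs hl hle
    cases t with
    | node c l r => exact absurd hs (by simp [pvShape])
    | leaf o =>
      simp only [pow_zero] at hle
      match napis, hle with
      | [], _ => simp [pvCollect]
      | [a], _ =>
        have ho : o = some a := by simpa [pvLeaves] using hl
        norm_num [pvCollect, ho]
  | succ k ih =>
    intro t napis hs hl hle
    cases t with
    | leaf o => exact absurd hs (by simp [pvShape])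
    | node c l r =>
      obtain ⟨hsl, hsr⟩ := hs
      have hLl := pvLeaves_length k l hsl
      have hLr := pvLeaves_length k r hsr
      have hp0 : 0 < 2 ^ k := Nat.two_pow_pos k
      have hpow : (2:Nat) ^ (k+1) = 2 ^ k + 2 ^ k := by rw [pow_succ]; omega
      have hlr : pvLeaves l ++ pvLeaves r = napis.map some ++ List.replicate (2 ^ (k+1) - napis.length) none := hl
      simp only [pvCollect, pvHalf]
      by_cases hsmall : napis.length ≤ 2 ^ k
      · have hleft : pvLeaves l = napis.map some ++ List.replicate (2 ^ k - napis.length) none := by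
          have h1 : pvLeaves l = (pvLeaves l ++ pvLeaves r).take (2 ^ k) := (List.take_left' hLl).symm
          rw [h1, hlr, List.take_append,
            List.take_of_length_le (by rw [List.length_map]; exact hsmall),
            List.take_replicate, List.length_map]
          congr 2
          omega
        rcases hnil : napis with _ | ⟨a, tl⟩
        · simp
        · rw [← hnil]
          have hne : ¬ ((napis.length : Int) ≤ 0) := by
            rw [hnil]; simp
          rw [if_neg hne, if_pos (by exact_mod_cast hsmall)]
          exact ih l napis hsl hleft hsmall
      · push_neg at hsmall
        have hne : ¬ ((napis.length : Int) ≤ 0) := by omega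
        rw [if_neg hne, if_neg (by push_neg; exact_mod_cast hsmall)]
        have hleft : pvLeaves l = (napis.take (2 ^ k)).map some := by
          have h1 : pvLeaves l = (pvLeaves l ++ pvLeaves r).take (2 ^ k) := (List.take_left' hLl).symm
          rw [h1, hlr, List.take_append, List.length_map,
            Nat.sub_eq_zero_of_le (Nat.le_of_lt hsmall), List.take_zero, List.append_nil,
            List.map_take]
        have hright : pvLeaves r = (napis.drop (2 ^ k)).map some ++
            List.replicate (2 ^ k - (napis.length - 2 ^ k)) none := by
          have h1 : pvLeaves r = (pvLeaves l ++ pvLeaves r).drop (2 ^ k) := (List.drop_left' hLl).symm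
          rw [h1, hlr, List.drop_append, List.length_map,
            Nat.sub_eq_zero_of_le (Nat.le_of_lt hsmall), List.drop_zero, List.map_drop]
          congr 2
          omega
        have e1 : pvCollect l ((2:Int) ^ k) ((2:Int) ^ k) = napis.take (2 ^ k) := by
          have h2 := ih l (napis.take (2 ^ k)) hsl (by
              rw [hleft, List.length_take, min_eq_left (Nat.le_of_lt hsmall), Nat.sub_self,
                List.replicate_zero, List.append_nil])
            (by rw [List.length_take]; omega)
          have hlen : (((napis.take (2 ^ k)).length : Nat) : Int) = (2:Int) ^ k := by
            rw [List.length_take, min_eq_left (Nat.le_of_lt hsmall)]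
            push_cast
            rfl
          rw [hlen] at h2
          exact h2
        have e2 : pvCollect r ((2:Int) ^ k) ((napis.length : Int) - (2:Int) ^ k) = napis.drop (2 ^ k) := by
          have h2 := ih r (napis.drop (2 ^ k)) hsr (by rw [hright, List.length_drop])
            (by rw [List.length_drop]; omega)
          have hlen : (((napis.drop (2 ^ k)).length : Nat) : Int) = (napis.length : Int) - (2:Int) ^ k := by
            rw [List.length_drop]
            push_cast [Nat.le_of_lt hsmall]
            ring
          rw [hlen] at h2
          exact h2
        rw [e1, e2, List.take_append_drop]

lemma pySetD_neg_one (xs : List String) (v : String) (h : xs ≠ []) :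
    PySem.List.pySetD xs (-1) v = xs.set (xs.length - 1) v := by
  have hlp : 0 < xs.length := List.length_pos_iff.mpr h
  have hidx : PySem.List.pyIdx? xs.length (-1) = some (xs.length - 1) := by
    unfold PySem.List.pyIdx?
    rw [if_neg (by omega), if_pos (by omega)]
    norm_num
  simp [PySem.List.pySetD, PySem.List.pySet?, hidx]

lemma pop_neg_one (xs : List String) (h : xs ≠ []) :
    PySem.List.pop? xs (-1) = some (xs.getLast h, xs.dropLast) := by
  conv_lhs => rw [← List.dropLast_concat_getLast h]
  rw [PySem.List.pop?_last]

-- the main loop invariant: B's tree mirrors A's evolving chunk list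
lemma loops_eq : ∀ (rest : List (List String)) (napis : List String) (t : PvTree) (k : Nat),
    pvBezpieczny rest napis = true →
    pvShape t k → pvWF t →
    pvLeaves t = napis.map some ++ List.replicate (2 ^ k - napis.length) none →
    napis.length + rest.length ≤ 2 ^ k →
    pvCollect (konstruujB rest t ((napis.length : Int)) ((2:Int) ^ k)).1 ((2:Int) ^ k)
        (konstruujB rest t ((napis.length : Int)) ((2:Int) ^ k)).2
      = konstruujA rest napis := by
  intro rest
  induction rest with
  | nil =>
    intro napis t k _ hs hw hl hle
    simp only [konstruujB, konstruujA]
    exact collect_spec k t napis hs hl (by omega)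
  | cons ins rest ih =>
    intro napis t k hsafe hs hw hl hle
    rw [pvBezpieczny] at hsafe
    rcases hkrok : pvKrok napis ins with _ | napis'
    · rw [hkrok] at hsafe; exact absurd hsafe (by simp)
    rw [hkrok] at hsafe
    rw [pvKrok] at hkrok
    by_cases hlen : ins.length < 2
    · rw [if_pos hlen] at hkrok; exact absurd hkrok (by simp)
    rw [if_neg hlen] at hkrok
    obtain ⟨c, l, tl, rfl⟩ : ∃ c l tl, ins = c :: l :: tl := by
      rcases ins with _ | ⟨c, _ | ⟨l, tl⟩⟩
      · simp at hlen
      · simp at hlen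
      · exact ⟨c, l, tl, rfl⟩
    have hget0 : (PySem.List.pyGet? (c :: l :: tl) (0 : Int)).getD "" = c := by
      simp [PySem.List.pyGet?_zero_cons]
    have hget1 : (PySem.List.pyGet? (c :: l :: tl) (1 : Int)).getD "" = l := by
      have : (1 : Int) = ((0 : Nat) : Int) + 1 := by norm_num
      rw [this, PySem.List.pyGet?_cons_succ]
      simp [PySem.List.pyGet?_zero_cons]
    simp only [List.getD_cons_zero, List.getD_cons_succ] at hkrok
    rw [konstruujA, konstruujB, hget0, hget1]
    by_cases hD : c = "DOPISZ"
    · subst hD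
      rw [if_pos rfl] at hkrok
      obtain rfl : napis' = napis ++ [l] := by simpa using hkrok.symm
      simp only [beq_self_eq_true, if_true, if_pos]
      rw [if_neg (by decide), if_neg (by decide), if_neg (by decide)]
      have hiLt : napis.length < 2 ^ k := by simp at hle; omega
      obtain ⟨s1, s2, s3, s4⟩ := pvSet_spec k t napis.length (some l) hs hiLt
      have hold : (pvLeaves t).getD napis.length none = none := by
        rw [hl, List.getD_append_right _ _ _ _ (by simp), List.length_map, Nat.sub_self,
          List.getD_replicate _ (by omega)]
      have hlv : pvLeaves (pvSet t ((2:Int)^k) ((napis.length : Int)) (some l)).1 =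
          (napis ++ [l]).map some ++ List.replicate (2 ^ k - (napis ++ [l]).length) none := by
        rw [s2, hl]
        rw [List.set_append_right _ _ (by simp), List.length_map, Nat.sub_self]
        have hrep : 2 ^ k - napis.length = (2 ^ k - (napis.length + 1)) + 1 := by omega
        rw [hrep, List.replicate_succ, List.set_cons_zero]
        simp
      have hln : ((napis.length : Int)) + 1 = (((napis ++ [l]).length : Nat) : Int) := by
        push_cast; simp
      rw [hln]
      exact ih (napis ++ [l]) _ k hsafe s1 (s4 hw) hlv (by simp at hle ⊢; omega)
    rw [if_neg hD] at hkrok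
    by_cases hZ : c = "ZMIEN"
    · subst hZ
      rw [if_pos rfl] at hkrok
      rcases he : napis.isEmpty with _ | _
      · rw [he] at hkrok
        simp only [Bool.false_eq_true, if_false] at hkrok
        have hne : napis ≠ [] := by simpa using he
        have hlp : 0 < napis.length := List.length_pos_iff.mpr hne
        obtain rfl : napis' = napis.set (napis.length - 1) l := by simpa using hkrok.symm
        simp only [beq_iff_eq, if_neg (by decide : ¬ ("ZMIEN" = "DOPISZ")), if_pos rfl,
          if_neg (by decide : ¬ ("ZMIEN" = "USUN")), if_neg (by decide : ¬ ("ZMIEN" = "PRZESUN")),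
          he, Bool.false_eq_true, if_false]
        rw [pySetD_neg_one napis l hne]
        have hcast : ((napis.length : Int)) - 1 = (((napis.length - 1 : Nat)) : Int) := by
          omega
        rw [hcast]
        obtain ⟨s1, s2, s3, s4⟩ := pvSet_spec k t (napis.length - 1) (some l) hs
          (by simp at hle; omega)
        have hlv : pvLeaves (pvSet t ((2:Int)^k) (((napis.length - 1 : Nat) : Int)) (some l)).1 =
            (napis.set (napis.length - 1) l).map some ++
              List.replicate (2 ^ k - (napis.set (napis.length - 1) l).length) none := by
          rw [s2, hl, List.set_append_left _ _ (by simp; omega), List.length_set, ← List.map_set]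
        have hln : ((napis.length : Int)) = (((napis.set (napis.length - 1) l).length : Nat) : Int) := by
          simp
        rw [hln]
        exact ih _ _ k hsafe s1 (s4 hw) hlv (by simp at hle ⊢; omega)
      · rw [he] at hkrok; exact absurd hkrok (by simp)
    rw [if_neg hZ] at hkrok
    by_cases hU : c = "USUN"
    · subst hU
      rw [if_pos rfl] at hkrok
      rcases he : napis.isEmpty with _ | _
      · rw [he] at hkrok
        simp only [Bool.false_eq_true, if_false] at hkrok
        have hne : napis ≠ [] := by simpa using he
        have hlp : 0 < napis.length := List.length_pos_iff.mpr hne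
        obtain rfl : napis' = napis.dropLast := by simpa using hkrok.symm
        simp only [beq_iff_eq, if_neg (by decide : ¬ ("USUN" = "DOPISZ")),
          if_neg (by decide : ¬ ("USUN" = "ZMIEN")), if_pos rfl,
          if_neg (by decide : ¬ ("USUN" = "PRZESUN")), he, Bool.false_eq_true, if_false]
        rw [pop_neg_one napis hne]
        have hcast : ((napis.length : Int)) - 1 = (((napis.length - 1 : Nat)) : Int) := by
          omega
        have hdl : napis.dropLast.length = napis.length - 1 := List.length_dropLast
        have hcast2 : ((napis.length : Int)) - 1 = ((napis.dropLast.length : Nat) : Int) := by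
          rw [hdl]; omega
        rw [hcast2]
        obtain ⟨s1, s2, s3, s4⟩ := pvSet_spec k t napis.dropLast.length none hs
          (by rw [hdl]; simp at hle; omega)
        have hsplit : napis = napis.dropLast ++ [napis.getLast hne] := by
          exact (List.dropLast_concat_getLast hne).symm
        have hmap : napis.map some = napis.dropLast.map some ++ [some (napis.getLast hne)] := by
          conv_lhs => rw [hsplit]
          rw [List.map_append, List.map_singleton]
        have hlv : pvLeaves (pvSet t ((2:Int)^k) ((napis.dropLast.length : Int)) none).1 =
            napis.dropLast.map some ++ List.replicate (2 ^ k - napis.dropLast.length) none := by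
          rw [s2, hl, hmap, List.append_assoc,
            List.set_append_right _ _ (by rw [List.length_map]),
            List.length_map, Nat.sub_self, List.singleton_append, List.set_cons_zero, hdl,
            show 2 ^ k - (napis.length - 1) = (2 ^ k - napis.length) + 1 from by
              simp at hle; omega,
            List.replicate_succ]
        exact ih _ _ k hsafe s1 (s4 hw) hlv (by simp [hdl] at hle ⊢; omega)
      · rw [he] at hkrok; exact absurd hkrok (by simp)
    rw [if_neg hU] at hkrok
    by_cases hP : c = "PRZESUN"
    · subst hP
      rw [if_pos rfl] at hkrok
      by_cases hl1 : l.toList.length = 1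
      · rw [if_pos hl1] at hkrok
        rcases hidx : PySem.List.index? napis l with _ | i
        · rw [hidx] at hkrok; exact absurd hkrok (by simp)
        rw [hidx] at hkrok
        obtain rfl : napis' = napis.set i (pvNast l) := by simpa using hkrok.symm
        simp only [beq_iff_eq, if_neg (by decide : ¬ ("PRZESUN" = "DOPISZ")),
          if_neg (by decide : ¬ ("PRZESUN" = "ZMIEN")),
          if_neg (by decide : ¬ ("PRZESUN" = "USUN")), if_pos rfl]
        obtain ⟨hk, hik, hfirst⟩ := PySem.List.getElem_of_index?_eq_some hidx
        have hLt : (pvLeaves t).length = 2 ^ k := pvLeaves_length k t hs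
        have hiL : i < (pvLeaves t).length := by
          rw [hLt]; simp at hle; omega
        have hgl : (pvLeaves t)[i] = some l := by
          rw [List.getElem_of_eq hl, List.getElem_append_left (by simpa using hk),
            List.getElem_map]
          exact congrArg some hik
        have hmin : ∀ j (hj : j < i), (pvLeaves t)[j]'(by omega) ≠ some l := by
          intro j hj
          rw [List.getElem_of_eq hl,
            List.getElem_append_left (by simpa using (by omega : j < napis.length)),
            List.getElem_map]
          intro hcon
          exact hfirst j hj (by simpa using hcon)
        have hmem : (some l) ∈ pvLeaves t := by
          rw [← hgl]; exact List.getElem_mem _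
        have hpos : ¬ (pvCount t l ≤ 0) := by
          rw [pvCount_eq k t l hs hw]
          unfold pvCnt
          push_neg
          exact_mod_cast List.count_pos_iff.mpr hmem
        rw [pvLeftmost, if_neg hpos]
        rw [pvDesc_spec k t l 0 i hs hw hiL hgl hmin]
        have hzA : zamiana_litery l 1 = pvNast l := rfl
        rw [hzA, hidx]
        simp only [if_true, zero_add]
        obtain ⟨s1, s2, s3, s4⟩ := pvSet_spec k t i (some (pvNast l)) hs
          (by simp at hle; omega)
        have hlv : pvLeaves (pvSet t ((2:Int)^k) ((i : Int)) (some (pvNast l))).1 =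
            (napis.set i (pvNast l)).map some ++
              List.replicate (2 ^ k - (napis.set i (pvNast l)).length) none := by
          rw [s2, hl, List.set_append_left _ _ (by simp; omega), List.length_set, ← List.map_set]
        have hln : ((napis.length : Int)) = (((napis.set i (pvNast l)).length : Nat) : Int) := by
          simp
        rw [hln]
        exact ih _ _ k hsafe s1 (s4 hw) hlv (by simp at hle ⊢; omega)
      · rw [if_neg hl1] at hkrok; exact absurd hkrok (by simp)
    rw [if_neg hP] at hkrok
    obtain rfl : napis' = napis := by simpa using hkrok.symm
    have hb : ∀ s : String, c ≠ s → (c == s) = false := by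
      intro s hcs; simpa using hcs
    rw [hb _ hD, hb _ hZ, hb _ hU, hb _ hP]
    simp only [Bool.false_eq_true, if_false]
    exact ih _ _ k hsafe hs hw hl (by simp at hle ⊢; omega)

-- ===== VERDICT (by name: the statement is the Claim_ definition above) =====
theorem konstruuj_napis_spec : Claim_equal_konstruuj_napis := by
  intro tab _ hpre
  unfold Spec_konstruuj_napis konstruuj_napis konstruuj_napis_alt
  obtain ⟨k, hk⟩ := pvSzLoop_pow tab.length 0 (tab.length : Int)
  rw [pow_zero] at hk
  have hge : (tab.length : Int) ≤ (2:Int) ^ k := by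
    rw [← hk]
    exact pvSzLoop_ge tab.length 1 (tab.length : Int) (by norm_num) (by push_cast; omega)
  have hgeN : tab.length ≤ 2 ^ k := by exact_mod_cast hge
  obtain ⟨ms, ml, mw⟩ := pvMake_spec k
  simp only [hk]
  have := loops_eq tab [] (pvMake ((2:Int) ^ k)) k hpre ms mw
    (by simpa using ml) (by simpa using hgeN)
  simp only [List.length_nil, Nat.cast_zero] at this
  rw [this]
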